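-- pv_equiv track=rewrite | github.com/owent/docker-setup | setup-router/dns/smartdns-generate-geosite.py | domain_matches_any_suffix
-- ===== SOURCE A (Python) =====
-- def domain_matches_any_suffix(domain: str, suffixes: set[str]) -> bool:
--     """Return whether a domain is covered by any suffix in the provided set."""
--
--     current = domain
--     while True:
--         if current in suffixes:
--             return True
--         if "." not in current:
--             return False
--         current = current.partition(".")[2]
-- ===== SOURCE B (Python) =====
-- def domain_matches_any_suffix(domain: str, suffixes: set[str]) -> bool:
--     """Return whether a domain is covered by any suffix in the provided set."""
--     for s in suffixes:
--         if domain == s or domain.endswith("." + s):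
--             return True
--     return False
-- ===== Notes on version B (the rewrite author's own statement) =====
-- stated objective: alternative
-- what changed: B iterates over the suffix set testing each candidate with domain == s or domain.endswith('.'+s), instead of A's loop that repeatedly peels the leading label off the domain and does a set-membership lookup.
import Mathlib
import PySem

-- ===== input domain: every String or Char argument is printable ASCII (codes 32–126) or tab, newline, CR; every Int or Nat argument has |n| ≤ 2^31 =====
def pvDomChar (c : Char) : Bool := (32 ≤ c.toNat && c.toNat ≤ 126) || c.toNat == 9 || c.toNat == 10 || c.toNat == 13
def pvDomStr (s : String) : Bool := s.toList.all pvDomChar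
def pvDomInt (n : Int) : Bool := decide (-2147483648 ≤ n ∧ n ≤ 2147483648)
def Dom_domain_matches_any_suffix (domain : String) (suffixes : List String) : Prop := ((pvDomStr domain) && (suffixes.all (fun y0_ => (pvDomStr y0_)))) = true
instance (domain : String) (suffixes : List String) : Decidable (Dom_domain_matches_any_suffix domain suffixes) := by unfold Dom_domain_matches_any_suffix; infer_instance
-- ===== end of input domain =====

-- B replaces A's label-peeling loop with a single pass over the suffix set testing
-- `domain == s or domain.endswith('.'+s)` (alternative decomposition, no speed claim).

-- ===== PORT A =====
-- current.partition(".")[2]: the remainder of the string after the first '.'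
def pvAfterDot : List Char → List Char
  | [] => []
  | c :: cs => if c = '.' then cs else pvAfterDot cs

-- termination measure for the port's while-loop (cited by decreasing_by)
theorem pvAfterDot_length_lt : ∀ (cs : List Char), cs ≠ [] → (pvAfterDot cs).length < cs.length := by
  intro cs h
  induction cs with
  | nil => exact absurd rfl h
  | cons c cs ih =>
    simp only [pvAfterDot]
    split
    · simp
    · cases cs with
      | nil => simp [pvAfterDot]
      | cons d ds => exact Nat.lt_succ_of_lt (ih (by simp))

-- the `while True` loop of A: membership test, dot test, peel
def pvALoop (current : List Char) (suffixes : List String) : Bool :=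
  if suffixes.any (fun s => current == s.toList) then true
  else if PySem.Chars.isIn ['.'] current = false then false
  else pvALoop (pvAfterDot current) suffixes
termination_by current.length
decreasing_by
  rename_i h
  apply pvAfterDot_length_lt
  intro hnil
  subst hnil
  exact h (by decide)

def domain_matches_any_suffix (domain : String) (suffixes : List String) : Bool :=
  pvALoop domain.toList suffixes

-- ===== PORT B =====
def domain_matches_any_suffix_alt (domain : String) (suffixes : List String) : Bool :=
  suffixes.any (fun s =>
    domain.toList == s.toList || PySem.Chars.endswith domain.toList ('.' :: s.toList))

-- ===== PRECONDITION & SPEC =====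
def Spec_domain_matches_any_suffix (domain : String) (suffixes : List String) (out : Bool) : Prop := out = domain_matches_any_suffix_alt domain suffixes
instance (domain : String) (suffixes : List String) (out : Bool) : Decidable (Spec_domain_matches_any_suffix domain suffixes out) := by unfold Spec_domain_matches_any_suffix; infer_instance

-- ===== CLAIM (what is proved, stated in full; the proofs are below) =====
def Claim_equal_domain_matches_any_suffix : Prop := ∀ (domain : String) (suffixes : List String), Dom_domain_matches_any_suffix domain suffixes → Spec_domain_matches_any_suffix domain suffixes (domain_matches_any_suffix domain suffixes)

-- ===== LEMMAS AND PROOFS =====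

-- any over the same list with pointwise-equal (on members) predicates
theorem pv_any_congr_mem {α : Type} (l : List α) (p q : α → Bool)
    (h : ∀ a ∈ l, p a = q a) : l.any p = l.any q := by
  induction l with
  | nil => rfl
  | cons a l ih => simp only [List.any_cons, h a (by simp), ih (fun s hs => h s (by simp [hs]))]

-- A string of the form '.'++t is a suffix of cs iff t is everything after the FIRST dot,
-- or '.'++t is a suffix of that remainder.
theorem pv_dot_suffix_iff (t : List Char) :
    ∀ (cs : List Char), '.' ∈ cs →
      (('.' :: t) <:+ cs ↔ t = pvAfterDot cs ∨ ('.' :: t) <:+ pvAfterDot cs) := by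
  intro cs
  induction cs with
  | nil => intro h; simp at h
  | cons c cs ih =>
    intro hmem
    by_cases hc : c = '.'
    · subst hc
      rw [show pvAfterDot ('.' :: cs) = cs from by simp [pvAfterDot], List.suffix_cons_iff]
      constructor
      · rintro (h | h)
        · left; exact (List.cons.injEq _ _ _ _ ▸ h).2
        · right; exact h
      · rintro (h | h)
        · left; rw [h]
        · right; exact h
    · have hmem' : '.' ∈ cs := by
        rcases List.mem_cons.mp hmem with h | h
        · exact absurd h.symm hc
        · exact h
      rw [show pvAfterDot (c :: cs) = pvAfterDot cs from by simp [pvAfterDot, hc],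
        List.suffix_cons_iff]
      constructor
      · rintro (h | h)
        · exact absurd (List.cons.injEq _ _ _ _ ▸ h).1.symm hc
        · exact (ih hmem').mp h
      · intro h
        right
        exact (ih hmem').mpr h

-- Characterization of A's loop as B's one-pass test
theorem pvALoop_eq (S : List String) : ∀ (n : Nat) (cs : List Char), cs.length ≤ n →
    pvALoop cs S = S.any (fun s => cs == s.toList || PySem.Chars.endswith cs ('.' :: s.toList)) := by
  intro n
  induction n with
  | zero =>
    intro cs hlen
    have hnil : cs = [] := List.length_eq_zero_iff.mp (Nat.le_zero.mp hlen)
    subst hnil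
    rw [pvALoop]
    by_cases h : S.any (fun s => ([] : List Char) == s.toList)
    · rw [if_pos h]
      symm
      rw [List.any_eq_true] at h ⊢
      obtain ⟨s, hs, he⟩ := h
      exact ⟨s, hs, by simp_all⟩
    · rw [if_neg h, if_pos (by simp [PySem.Chars.isIn, PySem.Chars.find_eq_neg_one_iff])]
      symm
      rw [List.any_eq_false]
      intro s hs
      simp only [Bool.or_eq_true, not_or]
      refine ⟨?_, ?_⟩
      · intro he
        exact h (List.any_eq_true.mpr ⟨s, hs, he⟩)
      · intro he
        have := (PySem.Chars.endswith_iff _ _).mp he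
        simp [List.suffix_nil] at this
  | succ n ih =>
    intro cs hlen
    rw [pvALoop]
    by_cases hmemb : S.any (fun s => cs == s.toList)
    · rw [if_pos hmemb]
      symm
      rw [List.any_eq_true] at hmemb ⊢
      obtain ⟨s, hs, he⟩ := hmemb
      exact ⟨s, hs, by simp_all⟩
    · rw [if_neg hmemb]
      have hne : ∀ s ∈ S, ¬ (cs == s.toList) = true := by
        intro s hs h
        exact hmemb (List.any_eq_true.mpr ⟨s, hs, h⟩)
      by_cases hdot : PySem.Chars.isIn ['.'] cs = false
      · rw [if_pos hdot]
        symm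
        rw [List.any_eq_false]
        intro s hs
        simp only [Bool.or_eq_true, not_or]
        refine ⟨hne s hs, ?_⟩
        intro he
        have hsuf := (PySem.Chars.endswith_iff _ _).mp he
        have : '.' ∈ cs := hsuf.subset (by simp)
        have : PySem.Chars.isIn ['.'] cs = true := by
          rw [PySem.Chars.isIn_iff_infix]
          exact (List.singleton_infix_iff '.' cs).mpr this
        simp [this] at hdot
      · rw [if_neg hdot]
        have hdot' : '.' ∈ cs := by
          have : PySem.Chars.isIn ['.'] cs = true := by
            cases h : PySem.Chars.isIn ['.'] cs
            · exact absurd h hdot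
            · rfl
          have hin := (PySem.Chars.isIn_iff_infix _ _).mp this
          exact hin.subset (by simp)
        have hnil : cs ≠ [] := List.ne_nil_of_mem hdot'
        have := ih (pvAfterDot cs) (by
          have := pvAfterDot_length_lt cs hnil
          omega)
        rw [this]
        -- elementwise: for s ∈ S, the test on cs equals the test on pvAfterDot cs
        apply pv_any_congr_mem
        intro s hs
        have h1 : (cs == s.toList) = false := by
          cases h : (cs == s.toList)
          · rfl
          · exact absurd h (hne s hs)
        rw [h1]
        simp only [Bool.false_or]
        apply Bool.eq_iff_iff.mpr
        rw [PySem.Chars.endswith_iff, Bool.or_eq_true, beq_iff_eq, PySem.Chars.endswith_iff,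
          pv_dot_suffix_iff _ cs hdot']
        constructor
        · rintro (h | h)
          · exact Or.inl h.symm
          · exact Or.inr h
        · rintro (h | h)
          · exact Or.inl h.symm
          · exact Or.inr h

-- ===== VERDICT (by name: the statement is the Claim_ definition above) =====
theorem domain_matches_any_suffix_spec : Claim_equal_domain_matches_any_suffix := by
  intro domain suffixes _
  unfold Spec_domain_matches_any_suffix domain_matches_any_suffix domain_matches_any_suffix_alt
  exact pvALoop_eq suffixes domain.toList.length domain.toList le_rfl
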